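-- pv_equiv track=rewrite | github.com/thiagopelizoni/MathChallenges | src/problem_191.py | prize_strings
-- ===== SOURCE A (Python) =====
-- from collections import defaultdict
--
-- def prize_strings(days):
--     dp = {(0, 0): 1}
--
--     for _ in range(days):
--         nxt = defaultdict(int)
--         for (late, absent), cnt in dp.items():
--             nxt[late, 0] += cnt
--             if late == 0:
--                 nxt[1, 0] += cnt
--             if absent < 2:
--                 nxt[late, absent + 1] += cnt
--         dp = nxt
--
--     return sum(dp.values())
-- ===== SOURCE B (Python) =====
-- def prize_strings(days):
--     # States in order: (late,absent) = (0,0),(1,0),(0,1),(1,1),(0,2),(1,2).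
--     # One day's transition is the 6x6 matrix M; answer = column sums of M^days.
--     def mul(X, Y):
--         return [[sum(X[i][k] * Y[k][j] for k in range(6)) for j in range(6)]
--                 for i in range(6)]
--
--     M = [
--         [1, 0, 1, 0, 1, 0],
--         [1, 1, 1, 1, 1, 1],
--         [1, 0, 0, 0, 0, 0],
--         [0, 1, 0, 0, 0, 0],
--         [0, 0, 1, 0, 0, 0],
--         [0, 0, 0, 1, 0, 0],
--     ]
--     R = [[1 if i == j else 0 for j in range(6)] for i in range(6)]
--     e = days if days > 0 else 0
--     B = M
--     while e:
--         if e & 1: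
--             R = mul(R, B)
--         B = mul(B, B)
--         e >>= 1
--     # initial vector is e_(0,0), so the answer is the sum of column 0 of M^days
--     return sum(R[i][0] for i in range(6))
-- ===== Notes on version B (the rewrite author's own statement) =====
-- stated objective: faster
-- what changed: Replaces the day-by-day dict DP with binary exponentiation of the 6-state transition matrix, summing column 0 of M^days.
import Mathlib
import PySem

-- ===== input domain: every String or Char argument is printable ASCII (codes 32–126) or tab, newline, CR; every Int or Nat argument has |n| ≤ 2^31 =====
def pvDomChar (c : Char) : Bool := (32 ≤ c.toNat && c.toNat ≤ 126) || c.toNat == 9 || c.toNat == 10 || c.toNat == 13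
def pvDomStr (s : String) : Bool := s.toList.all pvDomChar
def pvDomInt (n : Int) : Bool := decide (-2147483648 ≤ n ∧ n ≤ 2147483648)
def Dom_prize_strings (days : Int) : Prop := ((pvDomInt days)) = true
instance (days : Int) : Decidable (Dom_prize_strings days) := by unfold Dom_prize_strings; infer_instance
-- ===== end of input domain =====

-- B replaces A's day-by-day dict DP with binary exponentiation of the fixed 6-state
-- transition matrix (objective: faster, O(log days) matrix ops instead of O(days) steps).

-- ===== PORT A =====
-- nxt[k] += cnt on a defaultdict(int): nxt[k] = nxt.get(k, 0) + cnt
def pvBump (d : PySem.Dict (Int × Int) Int) (k : Int × Int) (cnt : Int) :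
    PySem.Dict (Int × Int) Int :=
  d.insert k (d.getD k 0 + cnt)

-- the body of A's 'for _ in range(days)' loop
def pvAStep (dp : PySem.Dict (Int × Int) Int) : PySem.Dict (Int × Int) Int :=
  dp.items.foldl
    (fun nxt kv =>
      let late := kv.1.1
      let absent := kv.1.2
      let cnt := kv.2
      let nxt := pvBump nxt (late, 0) cnt
      let nxt := if late = 0 then pvBump nxt (1, 0) cnt else nxt
      if absent < 2 then pvBump nxt (late, absent + 1) cnt else nxt)
    PySem.Dict.empty

def prize_strings (days : Int) : Int :=
  let dp0 : PySem.Dict (Int × Int) Int := PySem.Dict.ofList [((0, 0), 1)]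
  let dp := (PySem.List.pyRange 0 days 1).foldl (fun dp _ => pvAStep dp) dp0
  dp.values.sum

-- ===== PORT B =====
-- matrices are 6x6 lists of lists, as in Source B; X[i][j] -> pvEntry X i j (indexing is
-- exact here: every list built or indexed has exactly 6 rows/columns, so getD never defaults)
def pvEntry (L : List (List Int)) (i j : Nat) : Int := (L.getD i []).getD j 0

-- [[sum(X[i][k] * Y[k][j] for k in range(6)) for j in range(6)] for i in range(6)]
def pvMulL (X Y : List (List Int)) : List (List Int) :=
  (List.range 6).map fun i => (List.range 6).map fun j =>
    ((List.range 6).map fun k => pvEntry X i k * pvEntry Y k j).sum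

def pvML : List (List Int) :=
  [[1,0,1,0,1,0],
   [1,1,1,1,1,1],
   [1,0,0,0,0,0],
   [0,1,0,0,0,0],
   [0,0,1,0,0,0],
   [0,0,0,1,0,0]]

-- [[1 if i == j else 0 for j in range(6)] for i in range(6)]
def pvIdentL : List (List Int) :=
  (List.range 6).map fun i => (List.range 6).map fun j => if i = j then (1 : Int) else 0

-- the 'while e:' loop of B
def pvLoopL (e : Nat) (R B : List (List Int)) : List (List Int) :=
  if h : e = 0 then R
  else pvLoopL (e / 2) (if e % 2 = 1 then pvMulL R B else R) (pvMulL B B)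
termination_by e
decreasing_by exact Nat.div_lt_self (Nat.pos_of_ne_zero h) one_lt_two

def prize_strings_alt (days : Int) : Int :=
  let e : Nat := if 0 < days then days.toNat else 0
  let R := pvLoopL e pvIdentL pvML
  ((List.range 6).map fun i => pvEntry R i 0).sum

-- ===== PRECONDITION & SPEC =====
def Spec_prize_strings (days : Int) (out : Int) : Prop := out = prize_strings_alt days
instance (days : Int) (out : Int) : Decidable (Spec_prize_strings days out) := by unfold Spec_prize_strings; infer_instance

-- ===== CLAIM (what is proved, stated in full; the proofs are below) =====
def Claim_equal_prize_strings : Prop := ∀ (days : Int), Dom_prize_strings days → Spec_prize_strings days (prize_strings days)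

-- ===== LEMMAS AND PROOFS =====

-- abstract view of the list matrices, for the algebra
def pvToMat (L : List (List Int)) : Matrix (Fin 6) (Fin 6) Int :=
  Matrix.of fun i j => pvEntry L i.val j.val

def pvM : Matrix (Fin 6) (Fin 6) Int := pvToMat pvML

theorem pvGetD_map_range {α : Type} (f : Nat → α) (i : Nat) (hi : i < 6) (d : α) :
    ((List.range 6).map f).getD i d = f i := by
  rw [List.getD_eq_getElem?_getD, List.getElem?_map, List.getElem?_range hi]
  rfl

theorem pvEntry_mulL (X Y : List (List Int)) (i j : Nat) (hi : i < 6) (hj : j < 6) :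
    pvEntry (pvMulL X Y) i j =
      ((List.range 6).map fun k => pvEntry X i k * pvEntry Y k j).sum := by
  show ((pvMulL X Y).getD i []).getD j 0 = _
  unfold pvMulL
  rw [pvGetD_map_range _ _ hi, pvGetD_map_range _ _ hj]

theorem pvToMat_mul (X Y : List (List Int)) :
    pvToMat (pvMulL X Y) = pvToMat X * pvToMat Y := by
  ext i j
  show pvEntry (pvMulL X Y) i.val j.val = _
  rw [pvEntry_mulL X Y _ _ i.isLt j.isLt, Matrix.mul_apply, Fin.sum_univ_six]
  simp [List.range_succ, pvToMat]
  ring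

theorem pvToMat_ident : pvToMat pvIdentL = 1 := by
  ext i j
  fin_cases i <;> fin_cases j <;> decide

theorem pvLoopL_eq (e : Nat) : ∀ R B : List (List Int),
    pvToMat (pvLoopL e R B) = pvToMat R * (pvToMat B) ^ e := by
  induction e using Nat.strong_induction_on with
  | _ e ih =>
    intro R B
    rw [pvLoopL]
    by_cases h : e = 0
    · simp [h]
    · rw [dif_neg h, ih (e / 2) (Nat.div_lt_self (Nat.pos_of_ne_zero h) one_lt_two)]
      have hBB : (pvToMat (pvMulL B B)) ^ (e / 2) = (pvToMat B) ^ (2 * (e / 2)) := by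
        rw [pvToMat_mul, ← sq, ← pow_mul]
      by_cases hp : e % 2 = 1
      · obtain ⟨m, hm⟩ : ∃ m, e = 2 * m + 1 := ⟨e / 2, by omega⟩
        have h2 : e / 2 = m := by omega
        rw [if_pos hp, pvToMat_mul, hBB, h2, hm, pow_succ', mul_assoc]
      · obtain ⟨m, hm⟩ : ∃ m, e = 2 * m := ⟨e / 2, by omega⟩
        have h2 : e / 2 = m := by omega
        rw [if_neg hp, hBB, h2, hm]

-- the six state counts, in A's dict insertion order (0,0),(1,0),(0,1),(1,1),(0,2),(1,2)
structure PvVec where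
  a : Int
  b : Int
  c : Int
  d : Int
  e : Int
  f : Int
deriving DecidableEq, Repr

def pvC (v : PvVec) : PySem.Dict (Int × Int) Int :=
  PySem.Dict.mk [((0,0),v.a), ((1,0),v.b), ((0,1),v.c), ((1,1),v.d), ((0,2),v.e), ((1,2),v.f)]

def pvStep6 (v : PvVec) : PvVec :=
  ⟨v.a + v.c + v.e, v.a + v.b + v.c + v.d + v.e + v.f, v.a, v.b, v.c, v.d⟩

def pvProj (v : PvVec) : Fin 6 → Int := ![v.a, v.b, v.c, v.d, v.e, v.f]

theorem pvAStep_C (v : PvVec) : pvAStep (pvC v) = pvC (pvStep6 v) := by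
  apply PySem.Dict.ext
  simp [pvAStep, pvC, pvBump, pvStep6, PySem.Dict.insert,
    PySem.Dict.getD, PySem.Dict.get?, PySem.Dict.empty]

theorem pvIter_C (k : Nat) (v : PvVec) :
    pvAStep^[k] (pvC v) = pvC (pvStep6^[k] v) := by
  induction k generalizing v with
  | zero => rfl
  | succ k ih =>
    rw [Function.iterate_succ_apply, pvAStep_C, ih, ← Function.iterate_succ_apply]

theorem pvPow_col (k : Nat) (i : Fin 6) :
    (pvM ^ (k + 3)) i 0 = pvProj (pvStep6^[k] ⟨4, 8, 2, 3, 1, 1⟩) i := by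
  induction k generalizing i with
  | zero => fin_cases i <;> decide
  | succ k ih =>
    have h : pvM ^ (k + 1 + 3) = pvM * pvM ^ (k + 3) := by
      rw [show k + 1 + 3 = (k + 3) + 1 by omega, pow_succ']
    rw [h, Matrix.mul_apply, Fin.sum_univ_six]
    rw [ih 0, ih 1, ih 2, ih 3, ih 4, ih 5]
    rw [Function.iterate_succ_apply']
    fin_cases i <;> simp [pvM, pvToMat, pvEntry, pvML, pvProj, pvStep6]

theorem pvSumValues_C (v : PvVec) :
    (pvC v).values.sum = v.a + v.b + v.c + v.d + v.e + v.f := by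
  simp [pvC, PySem.Dict.values]
  ring

theorem pvFoldl_iterate (l : List Int) (d : PySem.Dict (Int × Int) Int) :
    l.foldl (fun dp _ => pvAStep dp) d = pvAStep^[l.length] d := by
  induction l generalizing d with
  | nil => rfl
  | cons x xs ih => simp [List.foldl, ih, Function.iterate_succ_apply]

theorem pvMain (n : Nat) :
    (pvAStep^[n] (PySem.Dict.ofList [((0, 0), 1)])).values.sum = ∑ i, (pvM ^ n) i 0 := by
  match n with
  | 0 => decide
  | 1 => decide
  | 2 => decide
  | (k + 3) =>
    have h3 : pvAStep^[3] (PySem.Dict.ofList [((0, 0), 1)]) = pvC ⟨4, 8, 2, 3, 1, 1⟩ := by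
      decide
    rw [Function.iterate_add_apply, h3, pvIter_C,
      pvSumValues_C, Fin.sum_univ_six]
    rw [pvPow_col k 0, pvPow_col k 1, pvPow_col k 2, pvPow_col k 3, pvPow_col k 4,
      pvPow_col k 5]
    simp [pvProj]

-- ===== VERDICT (by name: the statement is the Claim_ definition above) =====
theorem prize_strings_spec : Claim_equal_prize_strings := by
  intro days _
  unfold Spec_prize_strings prize_strings prize_strings_alt
  dsimp only
  rw [pvFoldl_iterate, PySem.List.length_pyRange_one]
  have he : (if 0 < days then days.toNat else 0) = days.toNat := by
    split <;> omega
  rw [he, sub_zero, pvMain days.toNat]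
  have hR := pvLoopL_eq days.toNat pvIdentL pvML
  rw [pvToMat_ident, one_mul] at hR
  have hcol : ∀ i : Fin 6, (pvM ^ days.toNat) i 0 =
      pvEntry (pvLoopL days.toNat pvIdentL pvML) i.val 0 := by
    intro i
    rw [show pvM = pvToMat pvML from rfl, ← hR]
    rfl
  rw [Fin.sum_univ_six, hcol 0, hcol 1, hcol 2, hcol 3, hcol 4, hcol 5]
  simp [List.range_succ]
  ring
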